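-- pv_equiv track=rewrite | github.com/EstevaoAugusto/Trabalho-GCC129 | ia_1_nlu/app/parser.py | find_keyword_match
-- ===== SOURCE A (Python) =====
-- from typing import List, Dict, Tuple, Optional
--
-- def find_keyword_match(text_fragment: str, product_keywords: List[str]) -> Optional[str]:
--     text_fragment_lower = text_fragment.lower().strip()
--     possible_matches = []
--     for kw in product_keywords:
--         if text_fragment_lower in kw.lower():
--             possible_matches.append(kw)
--
--     if not possible_matches:
--         return None
--
--     return max(possible_matches, key=len)
-- ===== SOURCE B (Python) =====
-- from typing import List, Optional
--
-- def find_keyword_match(text_fragment: str, product_keywords: List[str]) -> Optional[str]: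
--     frag = text_fragment.lower().strip()
--     for kw in sorted(product_keywords, key=len, reverse=True):
--         if frag in kw.lower():
--             return kw
--     return None
-- ===== Notes on version B (the rewrite author's own statement) =====
-- stated objective: alternative
-- what changed: Instead of filtering matches and then taking max(key=len), B stably sorts the keywords by length descending and returns the first one containing the fragment (stable reverse sort preserves max's first-maximal tie-breaking).
import Mathlib
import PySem

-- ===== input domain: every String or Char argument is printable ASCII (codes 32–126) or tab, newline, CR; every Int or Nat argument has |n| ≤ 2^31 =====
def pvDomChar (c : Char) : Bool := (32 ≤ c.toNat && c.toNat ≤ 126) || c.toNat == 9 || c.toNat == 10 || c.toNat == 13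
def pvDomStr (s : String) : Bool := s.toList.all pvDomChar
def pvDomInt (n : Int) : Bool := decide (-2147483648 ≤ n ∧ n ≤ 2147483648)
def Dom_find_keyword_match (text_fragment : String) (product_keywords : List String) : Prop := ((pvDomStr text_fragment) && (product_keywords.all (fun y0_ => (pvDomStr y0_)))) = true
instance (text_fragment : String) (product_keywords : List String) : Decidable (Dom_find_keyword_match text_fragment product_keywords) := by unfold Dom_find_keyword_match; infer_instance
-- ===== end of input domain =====

-- B replaces A's filter-then-max(key=len) with a stable length-descending sort followed by a first-match scan (same tie-breaking); objective: alternative.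


-- ===== PORT A =====
def find_keyword_match (text_fragment : String) (product_keywords : List String) : Option String :=
  let text_fragment_lower := PySem.Str.strip (PySem.Str.lower text_fragment)
  let possible_matches :=
    product_keywords.foldl
      (fun acc kw => if PySem.Str.isIn text_fragment_lower (PySem.Str.lower kw) then acc ++ [kw] else acc) []
  if possible_matches = [] then none
  else PySem.List.max? possible_matches PySem.Str.len

-- ===== PORT B =====
-- the for-loop with early return of Source B
def fkm_scan (frag : String) : List String → Option String
  | [] => none
  | kw :: rest => if PySem.Str.isIn frag (PySem.Str.lower kw) then some kw else fkm_scan frag rest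

def find_keyword_match_alt (text_fragment : String) (product_keywords : List String) : Option String :=
  let frag := PySem.Str.strip (PySem.Str.lower text_fragment)
  fkm_scan frag (PySem.List.sorted product_keywords PySem.Str.len true)

-- ===== PRECONDITION & SPEC =====
def Spec_find_keyword_match (text_fragment : String) (product_keywords : List String) (out : Option String) : Prop := out = find_keyword_match_alt text_fragment product_keywords
instance (text_fragment : String) (product_keywords : List String) (out : Option String) : Decidable (Spec_find_keyword_match text_fragment product_keywords out) := by unfold Spec_find_keyword_match; infer_instance

-- ===== CLAIM (what is proved, stated in full; the proofs are below) =====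
def Claim_equal_find_keyword_match : Prop := ∀ (text_fragment : String) (product_keywords : List String), Dom_find_keyword_match text_fragment product_keywords → Spec_find_keyword_match text_fragment product_keywords (find_keyword_match text_fragment product_keywords)

-- ===== LEMMAS AND PROOFS =====

-- abstract versions of B's scan and of the max?-combining step, used only by the proofs
def genScan (p : String → Bool) : List String → Option String
  | [] => none
  | kw :: rest => if p kw then some kw else genScan p rest

def genStep (p : String → Bool) (key : String → Int) (x : String) (o : Option String) : Option String :=
  match o with
  | none => if p x then some x else none
  | some m => if p x ∧ key m < key x then some x else some m

theorem fkm_scan_eq_genScan (frag : String) (S : List String) :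
    fkm_scan frag S = genScan (fun kw => PySem.Str.isIn frag (PySem.Str.lower kw)) S := by
  induction S with
  | nil => rfl
  | cons y ys ih => simp only [fkm_scan, genScan, ih]

theorem genScan_mem (p : String → Bool) (S : List String) (m : String)
    (h : genScan p S = some m) : m ∈ S := by
  induction S with
  | nil => simp [genScan] at h
  | cons y ys ih =>
    simp only [genScan] at h
    by_cases hy : p y = true
    · rw [if_pos hy] at h; exact (Option.some_inj.mp h) ▸ List.mem_cons_self
    · rw [if_neg hy] at h; exact List.mem_cons_of_mem _ (ih h)

-- scanning after inserting x into a key-descending list = combining x with the scan of the list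
theorem genScan_insertBy (p : String → Bool) (key : String → Int) (x : String) (S : List String)
    (hS : S.Pairwise (fun a b => key b ≤ key a)) :
    genScan p (PySem.List.insertBy (fun a b => decide (key b < key a)) x S)
      = genStep p key x (genScan p S) := by
  induction S with
  | nil => simp [PySem.List.insertBy, genScan, genStep]
  | cons y ys ih =>
    have hhead : ∀ z ∈ ys, key z ≤ key y := (List.pairwise_cons.mp hS).1
    have htail : ys.Pairwise (fun a b => key b ≤ key a) := (List.pairwise_cons.mp hS).2
    simp only [PySem.List.insertBy]
    by_cases hb : key y < key x
    · -- x goes in front of y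
      rw [if_pos (by simpa using hb)]
      show (if p x then some x else genScan p (y :: ys)) = genStep p key x (genScan p (y :: ys))
      by_cases hx : p x = true
      · rcases hm : genScan p (y :: ys) with _ | m
        · rw [if_pos hx]
          simp [genStep, hx]
        · have hmem := genScan_mem p (y :: ys) m hm
          have hlm : key m ≤ key y := by
            rcases List.mem_cons.mp hmem with h1 | h2
            · simp [h1]
            · exact hhead m h2
          rw [if_pos hx]
          simp [genStep, hx, lt_of_le_of_lt hlm hb]
      · rcases hm : genScan p (y :: ys) with _ | m <;>
          · rw [if_neg hx]; simp [genStep, hx]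

    · rw [if_neg (by simpa using hb)]
      show (if p y then some y else genScan p (PySem.List.insertBy (fun a b => decide (key b < key a)) x ys))
        = genStep p key x (genScan p (y :: ys))
      by_cases hy : p y = true
      · have hnc : ¬ (p x = true ∧ key y < key x) := fun h => hb h.2
        show _ = genStep p key x (if p y then some y else genScan p ys)
        rw [if_pos hy, if_pos hy]
        simp [genStep, hnc]
      · show _ = genStep p key x (if p y then some y else genScan p ys)
        rw [if_neg hy, if_neg hy]
        exact ih htail

-- the fold step of PySem.List.max?, as a named function
def stepFn (key : String → Int) (acc : Option String) (x : String) : Option String :=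
  match acc with
  | none => some x
  | some m => if key m < key x then some x else some m

theorem max?_eq_foldl (key : String → Int) (xs : List String) :
    PySem.List.max? xs key = List.foldl (stepFn key) none xs := by
  unfold PySem.List.max?
  apply List.foldl_ext
  intro o x _
  cases o <;> rfl

theorem stepFn_eq_genStep (key : String → Int) (x : String) (o : Option String) :
    stepFn key o x = genStep (fun _ => true) key x o := by
  cases o <;> simp [stepFn, genStep]

-- first-max over a list extended by one element
theorem max?_append_single (key : String → Int) (F : List String) (x : String) :
    PySem.List.max? (F ++ [x]) key
      = genStep (fun _ => true) key x (PySem.List.max? F key) := by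
  rw [max?_eq_foldl, max?_eq_foldl, List.foldl_append]
  simp only [List.foldl_cons, List.foldl_nil]
  exact stepFn_eq_genStep key x _

-- scanning the key-descending stable sort = running first-max over the filtered list
theorem genMain (p : String → Bool) (key : String → Int) (kws : List String) :
    genScan p (PySem.List.sorted kws key true)
      = PySem.List.max? (kws.filter p) key := by
  induction kws using List.reverseRecOn with
  | nil => rfl
  | append_singleton kws x ih =>
    rw [PySem.List.sorted_rev_eq_foldl_insertBy, List.foldl_append,
        ← PySem.List.sorted_rev_eq_foldl_insertBy]
    simp only [List.foldl_cons, List.foldl_nil]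
    rw [genScan_insertBy p key x _ (PySem.List.sorted_pairwise_rev kws key), ih]
    rw [List.filter_append]
    by_cases hx : p x = true
    · simp only [List.filter_cons, List.filter_nil, hx, if_true]
      rw [max?_append_single]
      rcases hF : PySem.List.max? (kws.filter p) key with _ | m <;>
        simp [genStep, hx]
    · simp only [List.filter_cons, List.filter_nil, hx, Bool.false_eq_true, if_false,
        List.append_nil]
      rcases hF : PySem.List.max? (kws.filter p) key with _ | m <;>
        simp [genStep, hx]

-- A's foldl-append loop followed by max? computes max? over the filtered keywords
theorem fkm_A_eq (frag : String) (kws : List String) :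
    (let possible := kws.foldl
        (fun acc kw => if PySem.Str.isIn frag (PySem.Str.lower kw) then acc ++ [kw] else acc) [];
     if possible = [] then none else PySem.List.max? possible PySem.Str.len)
      = PySem.List.max? (kws.filter (fun kw => PySem.Str.isIn frag (PySem.Str.lower kw))) PySem.Str.len := by
  have hposs := PySem.List.foldl_append_if
      (fun kw => PySem.Str.isIn frag (PySem.Str.lower kw)) (fun x => x) kws ([] : List String)
  simp only [List.nil_append] at hposs
  have hmapid : (List.map (fun x => x) (kws.filter fun kw => PySem.Str.isIn frag (PySem.Str.lower kw)))
      = kws.filter fun kw => PySem.Str.isIn frag (PySem.Str.lower kw) := by simp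
  rw [hmapid] at hposs
  simp only [hposs]
  rcases h : kws.filter (fun kw => PySem.Str.isIn frag (PySem.Str.lower kw)) with _ | ⟨y, ys⟩
  · simp [PySem.List.max?]
  · simp

-- ===== VERDICT (by name: the statement is the Claim_ definition above) =====
theorem find_keyword_match_spec : Claim_equal_find_keyword_match := by
  intro text_fragment product_keywords _
  show _ = _
  unfold find_keyword_match find_keyword_match_alt
  rw [fkm_scan_eq_genScan, genMain]
  exact fkm_A_eq _ product_keywords
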